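-- pv_equiv track=rewrite | github.com/Moh-abah/btr | app/services/indicators/pine_transpiler.py | _extract_main_logic
-- ===== SOURCE A (Python) =====
-- def _extract_main_logic(code: str) -> str:
--     """استخراج المنطق الرئيسي"""
--     lines = code.split('\n')
--     logic_lines = []
--
--     in_main_logic = False
--     for line in lines:
--         line = line.strip()
--
--         # تخطي التعليقات والتعريفات
--         if line.startswith('//') or line.startswith('study') or \
--            line.startswith('input') or '=>' in line:
--             continue
--
--         # بدء المنطق الرئيسي بعد آخر تعريف
--         if line and not line.startswith('plot'):
--             in_main_logic = True
--
--         if in_main_logic and line: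
--             logic_lines.append(line)
--
--     return '\n'.join(logic_lines)
-- ===== SOURCE B (Python) =====
-- def _extract_main_logic(code: str) -> str:
--     kept = [
--         l for l in (raw.strip() for raw in code.split('\n'))
--         if l and not (l.startswith('//') or l.startswith('study')
--                       or l.startswith('input') or '=>' in l)
--     ]
--     i = 0
--     while i < len(kept) and kept[i].startswith('plot'):
--         i += 1
--     return '\n'.join(kept[i:])
-- ===== Notes on version B (the rewrite author's own statement) =====
-- stated objective: simpler
-- what changed: Replaced A's single stateful loop with a sticky in_main_logic flag by a filter of stripped non-comment/non-definition lines followed by dropping only the leading run of plot lines.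
import Mathlib
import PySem

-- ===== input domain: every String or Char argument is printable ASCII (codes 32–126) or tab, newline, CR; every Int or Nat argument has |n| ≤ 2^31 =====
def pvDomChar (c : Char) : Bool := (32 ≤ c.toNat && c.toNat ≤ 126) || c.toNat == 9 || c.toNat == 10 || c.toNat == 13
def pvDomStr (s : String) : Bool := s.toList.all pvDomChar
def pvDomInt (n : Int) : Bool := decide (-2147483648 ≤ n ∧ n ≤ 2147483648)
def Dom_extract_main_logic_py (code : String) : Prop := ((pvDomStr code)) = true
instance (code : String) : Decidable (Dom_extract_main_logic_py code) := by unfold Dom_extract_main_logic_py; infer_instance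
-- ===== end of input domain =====

-- B replaces A's stateful flag loop by filter + drop-leading-plot-lines (simpler decomposition, same cost).

-- ===== PORT A =====
-- skipped lines: comments, study/input declarations, lambda definitions ('=>' in line)
def pvSkip (l : String) : Bool :=
  PySem.Str.startswith l "//" || PySem.Str.startswith l "study" ||
  PySem.Str.startswith l "input" || PySem.Str.isIn "=>" l

-- one iteration of A's for-loop; state = (in_main_logic, logic_lines)
def pvStepA (s : Bool × List String) (rawLine : String) : Bool × List String :=
  let line := PySem.Str.strip rawLine
  if pvSkip line then s
  else
    let inMain := if line != "" && !PySem.Str.startswith line "plot" then true else s.1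
    if inMain && line != "" then (inMain, s.2 ++ [line]) else (inMain, s.2)

def extract_main_logic_py (code : String) : String :=
  PySem.Str.join "\n" (((PySem.Str.split? code "\n").getD []).foldl pvStepA (false, [])).2

-- ===== PORT B =====
-- the while-loop of Source B that skips the leading run of plot lines, as structural recursion
def pvDropPlots : List String → List String
  | [] => []
  | l :: ls => if PySem.Str.startswith l "plot" then pvDropPlots ls else l :: ls

def extract_main_logic_py_alt (code : String) : String :=
  let kept := (((PySem.Str.split? code "\n").getD []).map PySem.Str.strip).filter
    (fun l => l != "" && !pvSkip l)
  PySem.Str.join "\n" (pvDropPlots kept)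

-- ===== PRECONDITION & SPEC =====
def Spec_extract_main_logic_py (code : String) (out : String) : Prop := out = extract_main_logic_py_alt code
instance (code : String) (out : String) : Decidable (Spec_extract_main_logic_py code out) := by unfold Spec_extract_main_logic_py; infer_instance

-- ===== CLAIM (what is proved, stated in full; the proofs are below) =====
def Claim_equal_extract_main_logic_py : Prop := ∀ (code : String), Dom_extract_main_logic_py code → Spec_extract_main_logic_py code (extract_main_logic_py code)

-- ===== LEMMAS AND PROOFS =====

def pvKept (lines : List String) : List String :=
  (lines.map PySem.Str.strip).filter (fun l => l != "" && !pvSkip l)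

lemma pvLoop_true (lines : List String) (acc : List String) :
    (lines.foldl pvStepA (true, acc)).2 = acc ++ pvKept lines := by
  induction lines generalizing acc with
  | nil => simp [pvKept]
  | cons l ls ih =>
    simp only [List.foldl_cons, pvKept, List.map_cons, List.filter_cons]
    by_cases hs : pvSkip (PySem.Str.strip l) = true
    · simp [pvStepA, hs, ih, pvKept]
    · by_cases he : PySem.Str.strip l = ""
      · simp [pvStepA, he, ih, pvKept]
      · have he' : (PySem.Str.strip l != "") = true := by simp [he]
        simp [pvStepA, hs, he', ih, pvKept]

lemma pvLoop_false (lines : List String) (acc : List String) :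
    (lines.foldl pvStepA (false, acc)).2 = acc ++ pvDropPlots (pvKept lines) := by
  induction lines generalizing acc with
  | nil => simp [pvKept, pvDropPlots]
  | cons l ls ih =>
    simp only [List.foldl_cons, pvKept, List.map_cons, List.filter_cons]
    by_cases hs : pvSkip (PySem.Str.strip l) = true
    · simp [pvStepA, hs, ih, pvKept]
    · by_cases he : PySem.Str.strip l = ""
      · simp [pvStepA, he, ih, pvKept]
      · have he' : (PySem.Str.strip l != "") = true := by simp [he]
        by_cases hp : PySem.Chars.startswith (PySem.Chars.strip l.toList) ['p','l','o','t'] = true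
        · simp [pvStepA, hs, he', hp, ih, pvKept, pvDropPlots]
        · simp [pvStepA, hs, he', hp, pvLoop_true, pvKept, pvDropPlots]

-- ===== VERDICT (by name: the statement is the Claim_ definition above) =====
theorem extract_main_logic_py_spec : Claim_equal_extract_main_logic_py := by
  intro code _
  show _ = _
  simp [extract_main_logic_py, extract_main_logic_py_alt, pvLoop_false, pvKept]
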